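-- pv_equiv track=rewrite | github.com/sdfapproach/leetcode | Move Pieces to Obtain a String.py | canChange
-- ===== SOURCE A (Python) =====
-- def canChange(start: str, target: str) -> bool:
--
--     start_positions = [(i, c) for i, c in enumerate(start) if c != '_']
--     target_positions = [(i, c) for i, c in enumerate(target) if c != '_']
--
--     if len(start_positions) != len(target_positions):
--         return False
--
--     for (start_idx, start_char), (target_idx, target_char) in zip(start_positions, target_positions):
--         if start_char != target_char:
--             return False
--         if start_char == 'L' and start_idx < target_idx:
--             return False
--         if start_char == 'R' and start_idx > target_idx:
--             return False
--
--     return True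
-- ===== SOURCE B (Python) =====
-- def canChange(start: str, target: str) -> bool:
--     n, m = len(start), len(target)
--     i = j = 0
--     while True:
--         while i < n and start[i] == '_':
--             i += 1
--         while j < m and target[j] == '_':
--             j += 1
--         if i == n or j == m:
--             return i == n and j == m
--         if start[i] != target[j]:
--             return False
--         if start[i] == 'L' and i < j:
--             return False
--         if start[i] == 'R' and i > j:
--             return False
--         i += 1
--         j += 1
-- ===== Notes on version B (the rewrite author's own statement) =====
-- stated objective: simpler
-- what changed: Replaces the two filtered position lists plus length check and zip loop by a single two-pointer merge over the strings that skips underscores in place, so no intermediate lists are built.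
import Mathlib
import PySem

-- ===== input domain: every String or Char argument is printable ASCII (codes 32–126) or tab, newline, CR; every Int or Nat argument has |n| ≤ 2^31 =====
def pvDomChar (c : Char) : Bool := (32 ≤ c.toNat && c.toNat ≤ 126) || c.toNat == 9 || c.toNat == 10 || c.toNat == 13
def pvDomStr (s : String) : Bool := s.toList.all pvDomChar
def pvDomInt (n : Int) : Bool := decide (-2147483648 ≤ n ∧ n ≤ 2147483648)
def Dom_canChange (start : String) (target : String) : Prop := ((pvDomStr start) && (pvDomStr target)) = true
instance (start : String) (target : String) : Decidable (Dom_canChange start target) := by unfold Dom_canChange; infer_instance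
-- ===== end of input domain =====

-- B replaces A's filtered position lists + zip loop by a two-pointer merge with O(1) extra space (objective: simpler).

-- ===== PORT A =====
-- the for-loop over zip(start_positions, target_positions)
def pvALoop : List ((Int × Char) × (Int × Char)) → Bool
  | [] => true
  | ((si, sc), (ti, tc)) :: rest =>
    if sc ≠ tc then false
    else if sc = 'L' ∧ si < ti then false
    else if sc = 'R' ∧ si > ti then false
    else pvALoop rest

def canChange (start : String) (target : String) : Bool :=
  let sp := (PySem.List.enumerate start.toList).filter (fun p => p.2 != '_')
  let tp := (PySem.List.enumerate target.toList).filter (fun p => p.2 != '_')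
  if sp.length ≠ tp.length then false
  else pvALoop (sp.zip tp)

-- ===== PORT B =====
-- the while-loop of Source B: i,j are the two pointers, the lists are the remaining suffixes
def pvBGo : Int → Int → List Char → List Char → Bool
  | i, j, x :: xs, ys =>
    if x = '_' then pvBGo (i+1) j xs ys
    else match ys with
      | y :: ys2 =>
        if y = '_' then pvBGo i (j+1) (x :: xs) ys2
        else if x ≠ y then false
        else if x = 'L' ∧ i < j then false
        else if x = 'R' ∧ i > j then false
        else pvBGo (i+1) (j+1) xs ys2
      | [] => false
  | i, j, [], y :: ys => if y = '_' then pvBGo i (j+1) [] ys else false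
  | _, _, [], [] => true
termination_by i j xs ys => xs.length + ys.length

def canChange_alt (start : String) (target : String) : Bool :=
  pvBGo 0 0 start.toList target.toList

-- ===== PRECONDITION & SPEC =====
def Spec_canChange (start : String) (target : String) (out : Bool) : Prop := out = canChange_alt start target
instance (start : String) (target : String) (out : Bool) : Decidable (Spec_canChange start target out) := by unfold Spec_canChange; infer_instance

-- ===== CLAIM (what is proved, stated in full; the proofs are below) =====
def Claim_equal_canChange : Prop := ∀ (start : String) (target : String), Dom_canChange start target → Spec_canChange start target (canChange start target)

-- ===== LEMMAS AND PROOFS =====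

-- the non-underscore positions of a suffix starting at index i
def pvF : Int → List Char → List (Int × Char)
  | _, [] => []
  | i, c :: cs => if c = '_' then pvF (i+1) cs else (i, c) :: pvF (i+1) cs

-- pairwise comparison of two position lists, failing on length mismatch
def pvCheck : List (Int × Char) → List (Int × Char) → Bool
  | [], [] => true
  | [], _ :: _ => false
  | _ :: _, [] => false
  | (si, sc) :: ss, (ti, tc) :: ts =>
    if sc ≠ tc then false
    else if sc = 'L' ∧ si < ti then false
    else if sc = 'R' ∧ si > ti then false
    else pvCheck ss ts

theorem pvF_eq_filter (l : List Char) (i : Int) :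
    (PySem.List.enumerate l i).filter (fun p => p.2 != '_') = pvF i l := by
  induction l generalizing i with
  | nil => simp [pvF, PySem.List.enumerate_nil]
  | cons c cs ih =>
    simp only [PySem.List.enumerate_cons, List.filter_cons, pvF]
    by_cases h : c = '_' <;> simp [h, ih]

theorem pvCheck_len {ss ts : List (Int × Char)} (h : ss.length ≠ ts.length) :
    pvCheck ss ts = false := by
  induction ss generalizing ts with
  | nil => cases ts with
    | nil => simp at h
    | cons t ts => simp [pvCheck]
  | cons s ss ih =>
    cases ts with
    | nil => simp [pvCheck]
    | cons t ts =>
      obtain ⟨si, sc⟩ := s; obtain ⟨ti, tc⟩ := t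
      simp only [pvCheck]
      split_ifs <;> first | rfl | (exact ih (by simpa using h))

theorem pvCheck_zip {ss ts : List (Int × Char)} (h : ss.length = ts.length) :
    pvCheck ss ts = pvALoop (ss.zip ts) := by
  induction ss generalizing ts with
  | nil => cases ts with
    | nil => simp [pvCheck, pvALoop]
    | cons t ts => simp at h
  | cons s ss ih =>
    cases ts with
    | nil => simp at h
    | cons t ts =>
      obtain ⟨si, sc⟩ := s; obtain ⟨ti, tc⟩ := t
      simp only [pvCheck, List.zip_cons_cons, pvALoop]
      split_ifs <;> first | rfl | (exact ih (by simpa using h))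

theorem pvBGo_eq (xs ys : List Char) (i j : Int) :
    pvBGo i j xs ys = pvCheck (pvF i xs) (pvF j ys) := by
  fun_induction pvBGo i j xs ys <;> simp_all [pvF, pvCheck]
  rename_i i j x xs y ys2 hy hxy hL hR ih
  by_cases hyL : y = 'L'
  · have hij : ¬ i < j := by have := hL hyL; omega
    simp [hyL, hij]
  · by_cases hyR : y = 'R'
    · have hji : ¬ j < i := by have := hR hyR; omega
      simp [hyL, hyR, hji]
    · simp [hyL, hyR]

-- ===== VERDICT (by name: the statement is the Claim_ definition above) =====
theorem canChange_spec : Claim_equal_canChange := by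
  intro start target _
  unfold Spec_canChange canChange canChange_alt
  simp only [pvF_eq_filter, pvBGo_eq]
  by_cases h : (pvF 0 start.toList).length = (pvF 0 target.toList).length
  · simp [h, pvCheck_zip h]
  · simp [h, pvCheck_len h]
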